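-- pv_equiv track=rewrite | github.com/pypi-data/pypi-mirror-386 | packages/maruadmin-agent/maruadmin_agent-0.3.2-py3-none-any.whl/maruadmin_agent/certificate_manager.py | _parse_certificate_list
-- ===== SOURCE A (Python) =====
-- from typing import Dict, List, Optional, Any
--
-- def _parse_certificate_list(output: str) -> List[Dict[str, Any]]:
--     """
--     Parse certbot certificates output.
--
--     Args:
--         output: Certbot certificates command output
--
--     Returns:
--         List of certificate information
--     """
--     certificates = []
--     current_cert = {}
--
--     for line in output.split('\n'):
--         line = line.strip()
--
--         if line.startswith('Certificate Name:'):
--             if current_cert: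
--                 certificates.append(current_cert)
--             current_cert = {'name': line.split(':', 1)[1].strip()}
--         elif line.startswith('Domains:'):
--             current_cert['domains'] = line.split(':', 1)[1].strip()
--         elif line.startswith('Expiry Date:'):
--             current_cert['expiry_date'] = line.split(':', 1)[1].strip()
--         elif line.startswith('Certificate Path:'):
--             current_cert['cert_path'] = line.split(':', 1)[1].strip()
--         elif line.startswith('Private Key Path:'):
--             current_cert['key_path'] = line.split(':', 1)[1].strip()
--
--     if current_cert:
--         certificates.append(current_cert)
--
--     return certificates
-- ===== SOURCE B (Python) =====
-- _FIELDS = [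
--     ('Certificate Name:', 'name'),
--     ('Domains:', 'domains'),
--     ('Expiry Date:', 'expiry_date'),
--     ('Certificate Path:', 'cert_path'),
--     ('Private Key Path:', 'key_path'),
-- ]
--
--
-- def _split_blocks(lines):
--     """Split stripped lines into blocks; a new block starts at each
--     'Certificate Name:' line; the first block is the (possibly empty) preamble."""
--     if not lines:
--         return [[]]
--     rest = _split_blocks(lines[1:])
--     if lines[0].startswith('Certificate Name:'):
--         return [[]] + [[lines[0]] + rest[0]] + rest[1:]
--     return [[lines[0]] + rest[0]] + rest[1:]
--
--
-- def _parse_block(lines):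
--     cert = {}
--     for line in lines:
--         for prefix, key in _FIELDS:
--             if line.startswith(prefix):
--                 cert[key] = line.split(':', 1)[1].strip()
--                 break
--     return cert
--
--
-- def _parse_certificate_list(output):
--     lines = [l.strip() for l in output.split('\n')]
--     blocks = _split_blocks(lines)
--     return [d for d in (_parse_block(b) for b in blocks) if d]
-- ===== Notes on version B (the rewrite author's own statement) =====
-- stated objective: alternative
-- what changed: Replaces the single stateful flush-on-marker loop by a two-phase decomposition: a recursive splitter groups the stripped lines into blocks at each 'Certificate Name:' line (keeping a preamble block), then each block is parsed independently via a prefix/key table and kept if non-empty.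
import Mathlib
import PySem

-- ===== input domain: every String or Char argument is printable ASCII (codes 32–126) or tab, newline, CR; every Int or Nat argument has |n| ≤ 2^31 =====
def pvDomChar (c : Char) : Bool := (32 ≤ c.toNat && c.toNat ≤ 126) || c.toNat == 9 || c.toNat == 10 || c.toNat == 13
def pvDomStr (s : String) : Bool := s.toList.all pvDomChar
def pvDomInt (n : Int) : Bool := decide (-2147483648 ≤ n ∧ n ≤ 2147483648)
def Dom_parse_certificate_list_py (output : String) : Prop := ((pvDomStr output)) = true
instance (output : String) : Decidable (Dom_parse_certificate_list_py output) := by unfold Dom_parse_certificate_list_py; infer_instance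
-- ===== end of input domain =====

-- B re-decomposes A's stateful flush-on-marker loop into split-into-blocks + parse-each-block; same values, no speed claim.

-- ===== PORT A =====
-- line.split(':', 1)[1].strip() — the [1] always exists under the startswith guards (each prefix contains ':')
def pvVal (line : String) : String :=
  PySem.Str.strip (((PySem.Str.splitMax? line ":" 1).getD []).getD 1 "")

def pvStepA (st : List (PySem.Dict String String) × PySem.Dict String String) (line : String) :
    List (PySem.Dict String String) × PySem.Dict String String :=
  if PySem.Str.startswith line "Certificate Name:" then
    ((if st.2.items.isEmpty then st.1 else st.1 ++ [st.2]),
      (PySem.Dict.empty).insert "name" (pvVal line))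
  else if PySem.Str.startswith line "Domains:" then (st.1, st.2.insert "domains" (pvVal line))
  else if PySem.Str.startswith line "Expiry Date:" then (st.1, st.2.insert "expiry_date" (pvVal line))
  else if PySem.Str.startswith line "Certificate Path:" then (st.1, st.2.insert "cert_path" (pvVal line))
  else if PySem.Str.startswith line "Private Key Path:" then (st.1, st.2.insert "key_path" (pvVal line))
  else st

def parse_certificate_list_py (output : String) : List (List (String × String)) :=
  let st := ((PySem.Str.split? output "\n").getD []).foldl
      (fun st line0 => pvStepA st (PySem.Str.strip line0)) ([], PySem.Dict.empty)
  (if st.2.items.isEmpty then st.1 else st.1 ++ [st.2]).map PySem.Dict.items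

-- ===== PORT B =====
def pvFields : List (String × String) :=
  [("Certificate Name:", "name"), ("Domains:", "domains"), ("Expiry Date:", "expiry_date"),
   ("Certificate Path:", "cert_path"), ("Private Key Path:", "key_path")]

def pvSplitBlocks : List String → List (List String)
  | [] => [[]]
  | x :: xs =>
    let rest := pvSplitBlocks xs
    if PySem.Str.startswith x "Certificate Name:" then
      [] :: (x :: rest.headD []) :: rest.tail
    else (x :: rest.headD []) :: rest.tail

def pvStepB (cert : PySem.Dict String String) (line : String) : PySem.Dict String String :=
  match pvFields.find? (fun pk => PySem.Str.startswith line pk.1) with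
  | some pk => cert.insert pk.2 (pvVal line)
  | none => cert

def pvParseBlock (lines : List String) : PySem.Dict String String :=
  lines.foldl pvStepB PySem.Dict.empty

def parse_certificate_list_py_alt (output : String) : List (List (String × String)) :=
  let lines := ((PySem.Str.split? output "\n").getD []).map PySem.Str.strip
  ((((pvSplitBlocks lines).map pvParseBlock).filter
      (fun d => !d.items.isEmpty)).map PySem.Dict.items)

-- ===== PRECONDITION & SPEC =====
def Spec_parse_certificate_list_py (output : String) (out : List (List (String × String))) : Prop := out = parse_certificate_list_py_alt output
instance (output : String) (out : List (List (String × String))) : Decidable (Spec_parse_certificate_list_py output out) := by unfold Spec_parse_certificate_list_py; infer_instance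

-- ===== CLAIM (what is proved, stated in full; the proofs are below) =====
def Claim_equal_parse_certificate_list_py : Prop := ∀ (output : String), Dom_parse_certificate_list_py output → Spec_parse_certificate_list_py output (parse_certificate_list_py output)

-- ===== LEMMAS AND PROOFS =====

-- right-recursive reformulation of A's fold
def pvRunA (cur : PySem.Dict String String) : List String → List (PySem.Dict String String)
  | [] => if cur.items.isEmpty then [] else [cur]
  | x :: xs =>
    if PySem.Str.startswith x "Certificate Name:" then
      (if cur.items.isEmpty then [] else [cur]) ++
        pvRunA ((PySem.Dict.empty).insert "name" (pvVal x)) xs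
    else pvRunA ((pvStepA ([], cur) x).2) xs

lemma pvStepA_marker (cs : List (PySem.Dict String String)) (cur : PySem.Dict String String)
    (x : String) (h : PySem.Str.startswith x "Certificate Name:" = true) :
    pvStepA (cs, cur) x =
      ((if cur.items.isEmpty then cs else cs ++ [cur]),
        (PySem.Dict.empty).insert "name" (pvVal x)) := by
  simp only [pvStepA, h, if_pos]

lemma pvStepA_nonmarker (cs : List (PySem.Dict String String)) (cur : PySem.Dict String String)
    (x : String) (h : PySem.Str.startswith x "Certificate Name:" = false) :
    pvStepA (cs, cur) x = (cs, (pvStepA ([], cur) x).2) := by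
  simp only [pvStepA, h, Bool.false_eq_true, if_false]
  split_ifs <;> rfl

lemma pvStepB_nonmarker (cur : PySem.Dict String String) (x : String)
    (h : PySem.Str.startswith x "Certificate Name:" = false) :
    pvStepB cur x = (pvStepA ([], cur) x).2 := by
  simp only [pvStepB, pvFields, List.find?, pvStepA, h, Bool.false_eq_true, if_false]
  by_cases h2 : PySem.Str.startswith x "Domains:" = true <;>
    by_cases h3 : PySem.Str.startswith x "Expiry Date:" = true <;>
      by_cases h4 : PySem.Str.startswith x "Certificate Path:" = true <;>
        by_cases h5 : PySem.Str.startswith x "Private Key Path:" = true <;>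
          simp_all

lemma pvStepB_marker (cur : PySem.Dict String String) (x : String)
    (h : PySem.Str.startswith x "Certificate Name:" = true) :
    pvStepB cur x = cur.insert "name" (pvVal x) := by
  simp only [pvStepB, pvFields, List.find?]
  simp_all

lemma pvFoldA : ∀ (ls : List String) (cs : List (PySem.Dict String String))
    (cur : PySem.Dict String String),
    (if (ls.foldl pvStepA (cs, cur)).2.items.isEmpty then (ls.foldl pvStepA (cs, cur)).1
     else (ls.foldl pvStepA (cs, cur)).1 ++ [(ls.foldl pvStepA (cs, cur)).2]) = cs ++ pvRunA cur ls
  | [], cs, cur => by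
    simp only [List.foldl_nil, pvRunA]
    split_ifs <;> simp
  | x :: xs, cs, cur => by
    simp only [List.foldl_cons, pvRunA]
    by_cases h : PySem.Str.startswith x "Certificate Name:" = true
    · rw [pvStepA_marker cs cur x h, h, if_pos rfl, pvFoldA xs _ _]
      split_ifs <;> simp
    · have h' : PySem.Str.startswith x "Certificate Name:" = false := by
        simpa using h
      rw [pvStepA_nonmarker cs cur x h', h', pvFoldA xs _ _]
      simp

lemma pvSplitBlocks_ne_nil (ls : List String) : pvSplitBlocks ls ≠ [] := by
  cases ls with
  | nil => simp [pvSplitBlocks]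
  | cons x xs => simp only [pvSplitBlocks]; split_ifs <;> simp

lemma pvRunA_eq : ∀ (ls : List String) (cur : PySem.Dict String String),
    pvRunA cur ls =
      (((pvSplitBlocks ls).headD []).foldl pvStepB cur ::
        ((pvSplitBlocks ls).tail).map pvParseBlock).filter (fun d => !d.items.isEmpty)
  | [], cur => by
    simp only [pvSplitBlocks, pvRunA, List.headD, List.tail, List.map_nil, List.foldl_nil,
      List.filter]
    cases hc : cur.items.isEmpty <;> simp_all
  | x :: xs, cur => by
    obtain ⟨b0, bs, hsplit⟩ : ∃ b0 bs, pvSplitBlocks xs = b0 :: bs := by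
      cases hs : pvSplitBlocks xs with
      | nil => exact absurd hs (pvSplitBlocks_ne_nil xs)
      | cons b0 bs => exact ⟨b0, bs, rfl⟩
    by_cases h : PySem.Str.startswith x "Certificate Name:" = true
    · have hpb : pvParseBlock (x :: b0) =
          b0.foldl pvStepB ((PySem.Dict.empty).insert "name" (pvVal x)) := by
        simp only [pvParseBlock, List.foldl_cons, pvStepB_marker PySem.Dict.empty x h]
      have hsx : pvSplitBlocks (x :: xs) = [] :: (x :: b0) :: bs := by
        simp only [pvSplitBlocks, hsplit, h, if_true, List.headD, List.tail]
      rw [hsx]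
      simp only [pvRunA, h, if_true, pvRunA_eq xs _, hsplit, List.headD, List.tail,
        List.map_cons, List.foldl_nil, hpb, List.filter_cons]
      cases hc : cur.items.isEmpty <;> simp_all
    · have h' : PySem.Str.startswith x "Certificate Name:" = false := by simpa using h
      have hsx : pvSplitBlocks (x :: xs) = (x :: b0) :: bs := by
        simp only [pvSplitBlocks, hsplit, h', Bool.false_eq_true, if_false, List.headD, List.tail]
      rw [hsx]
      simp only [pvRunA, h', Bool.false_eq_true, if_false, pvRunA_eq xs _, hsplit, List.headD,
        List.tail, List.foldl_cons, pvStepB_nonmarker cur x h']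

-- ===== VERDICT (by name: the statement is the Claim_ definition above) =====
theorem parse_certificate_list_py_spec : Claim_equal_parse_certificate_list_py := by
  intro output _
  show parse_certificate_list_py output = parse_certificate_list_py_alt output
  obtain ⟨b0, bs, hsplit⟩ : ∃ b0 bs,
      pvSplitBlocks (((PySem.Str.split? output "\n").getD []).map PySem.Str.strip) = b0 :: bs := by
    cases hs : pvSplitBlocks (((PySem.Str.split? output "\n").getD []).map PySem.Str.strip) with
    | nil => exact absurd hs (pvSplitBlocks_ne_nil _)
    | cons b0 bs => exact ⟨b0, bs, rfl⟩
  simp only [parse_certificate_list_py, parse_certificate_list_py_alt, ← List.foldl_map]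
  rw [pvFoldA, List.nil_append, pvRunA_eq, hsplit]
  simp only [List.headD, List.tail, List.map_cons, List.filter_cons, pvParseBlock]
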